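-- pv_equiv track=rewrite | github.com/MadsBKjaer/SPAC_week_2 | opg3/data_migration.py | width_correction
-- ===== SOURCE A (Python) =====
-- def width_correction(row: list[str], expected_width: int) -> None:
--     extra_width: int = len(row) - expected_width
--     empty_cells: int = row.count("")
--
--     if min(extra_width, empty_cells) == 0:
--         return ""
--
--     old_width: int = len(row)
--     for _ in range(min(extra_width, empty_cells)):
--         row.remove("")
--     return f"Empty cell: Removed {old_width - len(row)} cell(s). "
-- ===== SOURCE B (Python) =====
-- def width_correction(row: list[str], expected_width: int) -> None:
--     # Single-pass rebuild: drop the first k empty cells while scanning once,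
--     # rather than k separate row.remove("") scans.
--     k = min(len(row) - expected_width, row.count(""))
--     if k == 0:
--         return ""
--     kept = []
--     removed = 0
--     for cell in row:
--         if cell == "" and removed < k:
--             removed += 1
--         else:
--             kept.append(cell)
--     row[:] = kept
--     return f"Empty cell: Removed {removed} cell(s). "
-- ===== Notes on version B (the rewrite author's own statement) =====
-- stated objective: alternative
-- what changed: A shrinks the row by calling row.remove("") once per cell to drop; B rebuilds the row in a single pass, skipping the first k empty cells and counting them as it goes.
import Mathlib
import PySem

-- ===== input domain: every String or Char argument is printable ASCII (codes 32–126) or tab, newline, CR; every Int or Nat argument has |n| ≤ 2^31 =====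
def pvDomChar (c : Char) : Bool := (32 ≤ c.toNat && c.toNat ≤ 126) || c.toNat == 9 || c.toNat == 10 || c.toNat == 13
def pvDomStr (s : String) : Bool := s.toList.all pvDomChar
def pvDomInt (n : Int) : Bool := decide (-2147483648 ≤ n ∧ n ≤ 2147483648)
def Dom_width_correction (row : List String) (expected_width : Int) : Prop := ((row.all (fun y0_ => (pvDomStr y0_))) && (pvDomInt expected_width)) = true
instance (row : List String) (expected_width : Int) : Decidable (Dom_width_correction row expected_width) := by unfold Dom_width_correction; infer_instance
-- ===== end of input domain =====

-- B rebuilds the row in one pass instead of k separate remove("") scans (alternative algorithm);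
-- equivalence is about the RETURN value (both Pythons also mutate `row`, to the same final state).

-- ===== PORT A =====
def width_correction (row : List String) (expected_width : Int) : String :=
  let extra_width : Int := (row.length : Int) - expected_width
  let empty_cells : Int := (PySem.List.count row "" : Int)
  if min extra_width empty_cells == 0 then ""
  else
    let old_width : Int := (row.length : Int)
    -- row.remove("") never raises here: the loop runs min(extra, count) ≤ count times
    let row' := (PySem.List.pyRange 0 (min extra_width empty_cells) 1).foldl
      (fun r _ => match PySem.List.remove? r "" with | some r' => r' | none => r) row
    "Empty cell: Removed " ++ PySem.Int.toStr (old_width - (row'.length : Int)) ++ " cell(s). "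

-- ===== PORT B =====
def width_correction_alt (row : List String) (expected_width : Int) : String :=
  let k : Int := min ((row.length : Int) - expected_width) ((PySem.List.count row "" : Int))
  if k == 0 then ""
  else
    let st := row.foldl
      (fun (p : List String × Int) cell =>
        if cell == "" && decide (p.2 < k) then (p.1, p.2 + 1) else (p.1 ++ [cell], p.2))
      (([] : List String), (0 : Int))
    "Empty cell: Removed " ++ PySem.Int.toStr st.2 ++ " cell(s). "

-- ===== PRECONDITION & SPEC =====
def Spec_width_correction (row : List String) (expected_width : Int) (out : String) : Prop := out = width_correction_alt row expected_width
instance (row : List String) (expected_width : Int) (out : String) : Decidable (Spec_width_correction row expected_width out) := by unfold Spec_width_correction; infer_instance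

-- ===== CLAIM (what is proved, stated in full; the proofs are below) =====
def Claim_equal_width_correction : Prop := ∀ (row : List String) (expected_width : Int), Dom_width_correction row expected_width → Spec_width_correction row expected_width (width_correction row expected_width)

-- ===== LEMMAS AND PROOFS =====

-- B's fold: once the counter has reached k it never increments again.
theorem fold_snd_ge (k : Int) (l : List String) (acc : List String) (r : Int) (h : k ≤ r) :
    (l.foldl (fun (p : List String × Int) cell =>
        if cell == "" && decide (p.2 < k) then (p.1, p.2 + 1) else (p.1 ++ [cell], p.2))
      (acc, r)).2 = r := by
  induction l generalizing acc r with
  | nil => rfl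
  | cons c l ih =>
    simp only [List.foldl_cons]
    have hnr : decide (r < k) = false := by simp; omega
    simp only [hnr, Bool.and_false, Bool.false_eq_true, if_false]
    exact ih _ _ h

-- B's fold: while the counter is below k it counts empties, capped at k.
theorem fold_snd_le (k : Int) (l : List String) (acc : List String) (r : Int) (h : r ≤ k) :
    (l.foldl (fun (p : List String × Int) cell =>
        if cell == "" && decide (p.2 < k) then (p.1, p.2 + 1) else (p.1 ++ [cell], p.2))
      (acc, r)).2 = min k (r + (l.count "" : Int)) := by
  induction l generalizing acc r with
  | nil => simp; omega
  | cons c l ih =>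
    simp only [List.foldl_cons]
    by_cases hc : c = ""
    · subst hc
      by_cases hr : r < k
      · have ht : decide (r < k) = true := by simpa using hr
        simp only [BEq.rfl, ht, Bool.and_true, if_true]
        rw [ih _ _ (by omega)]
        simp only [List.count_cons, BEq.rfl, if_true]
        push_cast
        omega
      · have hf : decide (r < k) = false := by simpa using hr
        simp only [BEq.rfl, hf, Bool.and_false, Bool.false_eq_true, if_false]
        rw [fold_snd_ge k l (acc ++ [""]) r (by omega)]
        have hcnt : (0 : Int) ≤ (l.count "" : Int) := Int.natCast_nonneg _
        simp only [List.count_cons, BEq.rfl, if_true]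
        push_cast
        omega
    · have hf : (c == "") = false := by simpa using hc
      simp only [hf, Bool.false_and, Bool.false_eq_true, if_false]
      rw [ih _ _ h]
      simp [hc]

-- A's fold: n successful remove("") calls shrink the list by exactly n.
theorem removeN_length (l : List Int) (row : List String) (h : l.length ≤ List.count "" row) :
    ((l.foldl (fun r _ => match PySem.List.remove? r "" with | some r' => r' | none => r) row)).length
      = row.length - l.length := by
  induction l generalizing row with
  | nil => simp
  | cons a l ih =>
    simp only [List.foldl_cons, List.length_cons] at *
    have hmem : "" ∈ row := by
      have : 0 < List.count "" row := by omega
      exact List.count_pos_iff.mp this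
    rw [PySem.List.remove?_eq_some_erase row "" hmem]
    simp only []
    have hlen : (row.erase "").length = row.length - 1 := List.length_erase_of_mem hmem
    have hcnt : List.count "" (row.erase "") = List.count "" row - 1 := List.count_erase_self
    rw [ih (row.erase "") (by omega)]
    have hpos : 1 ≤ row.length := List.length_pos_of_mem hmem
    omega

-- ===== VERDICT (by name: the statement is the Claim_ definition above) =====
theorem width_correction_spec : Claim_equal_width_correction := by
  intro row expected_width _
  unfold Spec_width_correction width_correction width_correction_alt
  simp only [PySem.List.count_eq]
  by_cases h0 : min ((row.length : Int) - expected_width) ((List.count "" row : Int)) = 0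
  · simp [h0]
  · have hne : ((min ((row.length : Int) - expected_width) ((List.count "" row : Int))) == 0) = false := by
      simpa using h0
    simp only [hne, Bool.false_eq_true, if_false]
    set K : Int := min ((row.length : Int) - expected_width) ((List.count "" row : Int)) with hK
    have hKc : K ≤ (List.count "" row : Int) := by rw [hK]; exact min_le_right _ _
    have hKl : K ≤ (row.length : Int) := by
      have := List.count_le_length (l := row) (a := "")
      omega
    simp only [← hK]
    by_cases hKpos : 0 < K
    · have hA := removeN_length (PySem.List.pyRange 0 K 1) row
        (by rw [PySem.List.length_pyRange_one]; omega)
      rw [PySem.List.length_pyRange_one] at hA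
      have hB := fold_snd_le K row [] 0 (by omega)
      rw [hA, hB]
      have harg : (row.length : Int) - ((row.length - (K - 0).toNat : Nat) : Int)
          = min K (0 + (List.count "" row : Int)) := by omega
      rw [harg]
    · have hKneg : K < 0 := by omega
      rw [PySem.List.pyRange_one_eq_nil (by omega)]
      simp only [List.foldl_nil]
      rw [fold_snd_ge K row [] 0 (by omega)]
      norm_num
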